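-- pv_equiv track=rewrite | github.com/Victor220311/Actividades-Tema-1 | main.py | clasificar_numeros
-- ===== SOURCE A (Python) =====
-- def clasificar_numeros(lista_numeros):
--     """
--     Clasifica números en pares, impares y negativos
--     """
--     pares = []
--     impares = []
--     negativos = []
--
--     for numero in lista_numeros:
--         if numero < 0:
--             negativos.append(numero)
--         if numero % 2 == 0:
--             pares.append(numero)
--         else:
--             impares.append(numero)
--
--     return pares, impares, negativos
-- ===== SOURCE B (Python) =====
-- def clasificar_numeros(lista_numeros):
--     """
--     Clasifica números en pares, impares y negativos
--     """
--     pares = [x for x in lista_numeros if x % 2 == 0]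
--     impares = [x for x in lista_numeros if x % 2 != 0]
--     negativos = [x for x in lista_numeros if x < 0]
--     return pares, impares, negativos
-- ===== Notes on version B (the rewrite author's own statement) =====
-- stated objective: idiomatic
-- what changed: Replaces the single fused loop with three append branches by three independent list comprehensions, each filtering the list once (even, odd, negative).
import Mathlib
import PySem

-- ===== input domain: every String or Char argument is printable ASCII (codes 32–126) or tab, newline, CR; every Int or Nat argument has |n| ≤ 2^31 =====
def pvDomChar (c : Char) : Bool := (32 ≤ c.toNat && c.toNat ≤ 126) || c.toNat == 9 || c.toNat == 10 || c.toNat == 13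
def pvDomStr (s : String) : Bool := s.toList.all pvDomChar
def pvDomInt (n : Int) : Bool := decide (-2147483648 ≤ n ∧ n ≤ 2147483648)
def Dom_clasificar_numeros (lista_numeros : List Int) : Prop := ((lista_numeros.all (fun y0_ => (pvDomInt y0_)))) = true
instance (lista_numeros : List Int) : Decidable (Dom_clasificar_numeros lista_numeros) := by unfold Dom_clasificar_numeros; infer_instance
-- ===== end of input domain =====

-- B replaces A's single fused classification loop by three independent filter passes (idiomatic decomposition; same O(n) cost).


-- ===== PORT A =====
-- A's loop body: append to negativos if numero < 0, then to pares or impares by numero % 2 (Python %: PySem.Int.mod).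
def clasificarStep (acc : List Int × List Int × List Int) (numero : Int) : List Int × List Int × List Int :=
  let (pares, impares, negativos) := acc
  let negativos := if numero < 0 then negativos ++ [numero] else negativos
  if PySem.Int.mod numero 2 == 0 then (pares ++ [numero], impares, negativos)
  else (pares, impares ++ [numero], negativos)

-- A: one fused loop over the list carrying the three accumulators.
def clasificar_numeros (lista_numeros : List Int) : List Int × List Int × List Int :=
  lista_numeros.foldl clasificarStep ([], [], [])

-- ===== PORT B =====
-- B: three independent filter passes (the three list comprehensions of Source B).
def clasificar_numeros_alt (lista_numeros : List Int) : List Int × List Int × List Int :=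
  (lista_numeros.filter (fun x => PySem.Int.mod x 2 == 0),
   lista_numeros.filter (fun x => !(PySem.Int.mod x 2 == 0)),
   lista_numeros.filter (fun x => x < 0))

-- ===== PRECONDITION & SPEC =====
def Spec_clasificar_numeros (lista_numeros : List Int) (out : List Int × List Int × List Int) : Prop := out = clasificar_numeros_alt lista_numeros
instance (lista_numeros : List Int) (out : List Int × List Int × List Int) : Decidable (Spec_clasificar_numeros lista_numeros out) := by unfold Spec_clasificar_numeros; infer_instance

-- ===== CLAIM (what is proved, stated in full; the proofs are below) =====
def Claim_equal_clasificar_numeros : Prop := ∀ (lista_numeros : List Int), Dom_clasificar_numeros lista_numeros → Spec_clasificar_numeros lista_numeros (clasificar_numeros lista_numeros)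

-- ===== LEMMAS AND PROOFS =====

-- The step function written with the two ifs hoisted out of the lets, for clean rewriting.
theorem clasificarStep_eq (p i n : List Int) (x : Int) :
    clasificarStep (p, i, n) x =
      ((if PySem.Int.mod x 2 == 0 then p ++ [x] else p),
       (if PySem.Int.mod x 2 == 0 then i else i ++ [x]),
       (if x < 0 then n ++ [x] else n)) := by
  unfold clasificarStep
  split_ifs <;> rfl

-- Loop invariant: A's fold, started from any accumulators, appends exactly B's three filters.
theorem clasificar_foldl_inv (l p i n : List Int) :
    l.foldl clasificarStep (p, i, n)
    = (p ++ l.filter (fun x => PySem.Int.mod x 2 == 0),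
       i ++ l.filter (fun x => !(PySem.Int.mod x 2 == 0)),
       n ++ l.filter (fun x => x < 0)) := by
  induction l generalizing p i n with
  | nil => simp
  | cons hd tl ih =>
    rw [List.foldl_cons, clasificarStep_eq]
    by_cases h2 : (PySem.Int.mod hd 2 == 0) = true <;> by_cases hn : hd < 0 <;>
      simp only [h2, hn, if_pos, if_neg, not_false_iff] <;>
      rw [ih] <;> simp [List.filter_cons, hn] <;>
      (simp only [beq_iff_eq] at h2; rw [PySem.Int.mod_eq_zero_iff_dvd] at h2; omega)

-- ===== VERDICT (by name: the statement is the Claim_ definition above) =====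
theorem clasificar_numeros_spec : Claim_equal_clasificar_numeros := by
  intro l _
  show _ = _
  rw [clasificar_numeros, clasificar_foldl_inv]
  rfl
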